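-- pv_equiv track=rewrite | github.com/mslee2129/ml_cw1 | classification_helpers.py | create_label_distribution_table
-- ===== SOURCE A (Python) =====
-- def create_label_distribution_table(label_array):
--     label_distribution = []
--     for label in label_array:
--         found = False
--
--         for sublist in label_distribution:
--             # sublist = [label number, number iterations]
--             if sublist[0] == label:
--                 sublist[1] += 1
--                 found = True
--
--         if not found:
--             # appending a sublist with label number and iteration 1
--             label_distribution.append([label, 1])
--
--     return label_distribution
-- ===== SOURCE B (Python) =====
-- def create_label_distribution_table(label_array):
--     # phase 1: distinct labels in first-appearance order
--     distinct = []
--     seen = set()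
--     for label in label_array:
--         if label not in seen:
--             seen.add(label)
--             distinct.append(label)
--     # phase 2: count each distinct label with list.count over the input
--     return [[lab, label_array.count(lab)] for lab in distinct]
-- ===== Notes on version B (the rewrite author's own statement) =====
-- stated objective: simpler
-- what changed: Splits A's single interleaved detect-and-mutate pass over a growing mutable table into two staged passes: first collect the distinct labels in first-appearance order, then count each by a fresh scan of the input.
import Mathlib
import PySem

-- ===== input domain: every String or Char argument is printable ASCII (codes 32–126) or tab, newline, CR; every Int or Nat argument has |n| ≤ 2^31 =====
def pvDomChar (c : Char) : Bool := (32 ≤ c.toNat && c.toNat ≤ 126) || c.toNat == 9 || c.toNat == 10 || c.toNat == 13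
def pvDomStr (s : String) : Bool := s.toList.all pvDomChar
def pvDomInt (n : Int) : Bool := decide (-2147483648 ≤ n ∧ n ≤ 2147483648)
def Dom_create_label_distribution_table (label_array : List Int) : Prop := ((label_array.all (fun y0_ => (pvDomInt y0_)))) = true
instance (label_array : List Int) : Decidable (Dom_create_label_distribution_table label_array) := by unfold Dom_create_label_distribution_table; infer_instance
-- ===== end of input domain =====

-- B replaces A's single interleaved detect-and-mutate pass with two staged passes
-- (collect the distinct labels, then count each with list.count); a simpler staged decomposition.

-- ===== PORT A =====
-- body of A's outer loop: the inner 'for sublist in label_distribution' scan (state = rebuilt list + found flag;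
-- 'sublist[1] += 1' becomes replacing the sublist by [sublist[0], sublist[1] + 1]), then the 'if not found' append
def pvStepA (dist : List (List Int)) (label : Int) : List (List Int) :=
  let r := dist.foldl
    (fun (st : List (List Int) × Bool) sub =>
      if sub.getD 0 0 == label then (st.1 ++ [[sub.getD 0 0, sub.getD 1 0 + 1]], true)
      else (st.1 ++ [sub], st.2))
    ([], false)
  if r.2 then r.1 else r.1 ++ [[label, 1]]

def create_label_distribution_table (label_array : List Int) : List (List Int) :=
  label_array.foldl pvStepA []

-- ===== PORT B =====
-- phase 1 of Source B: state = (seen : set, distinct : list); 'if label not in seen: seen.add(label); distinct.append(label)'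
-- phase 2: '[[lab, label_array.count(lab)] for lab in distinct]'
def create_label_distribution_table_alt (label_array : List Int) : List (List Int) :=
  let r := label_array.foldl
    (fun (st : PySem.Set Int × List Int) label =>
      if PySem.Set.contains st.1 label then st else (PySem.Set.add st.1 label, st.2 ++ [label]))
    (PySem.Set.empty, [])
  r.2.map (fun lab => [lab, (PySem.List.count label_array lab : Int)])

-- ===== PRECONDITION & SPEC =====
def Spec_create_label_distribution_table (label_array : List Int) (out : List (List Int)) : Prop := out = create_label_distribution_table_alt label_array
instance (label_array : List Int) (out : List (List Int)) : Decidable (Spec_create_label_distribution_table label_array out) := by unfold Spec_create_label_distribution_table; infer_instance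

-- ===== CLAIM (what is proved, stated in full; the proofs are below) =====
def Claim_equal_create_label_distribution_table : Prop := ∀ (label_array : List Int), Dom_create_label_distribution_table label_array → Spec_create_label_distribution_table label_array (create_label_distribution_table label_array)

-- ===== LEMMAS AND PROOFS =====

-- proof helpers: the distinct labels in first-appearance order, and the per-label count
def pvDstnct (p : List Int) : List Int :=
  p.foldl (fun seen label => if seen.any (fun d => d == label) then seen else seen ++ [label]) []

def pvCnt (p : List Int) (lab : Int) : Int :=
  p.foldl (fun c x => if x == lab then c + 1 else c) 0

-- A's accumulator after a prefix p
def pvTab (p : List Int) : List (List Int) := (pvDstnct p).map (fun lab => [lab, pvCnt p lab])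

lemma pv_any_beq (seen : List Int) (y : Int) :
    (seen.any (fun d => d == y)) = true ↔ y ∈ seen := by
  simp only [List.any_eq_true, beq_iff_eq]
  constructor
  · rintro ⟨d, hd, rfl⟩; exact hd
  · intro h; exact ⟨y, h, rfl⟩

lemma pvDstnct_mem_aux (p : List Int) (seen : List Int) (x : Int) :
    x ∈ p.foldl (fun seen label => if seen.any (fun d => d == label) then seen else seen ++ [label]) seen
      ↔ x ∈ seen ∨ x ∈ p := by
  induction p generalizing seen with
  | nil => simp
  | cons y p ih =>
    rw [List.foldl_cons]
    by_cases hy : y ∈ seen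
    · rw [if_pos ((pv_any_beq seen y).mpr hy), ih]
      constructor
      · rintro (h | h)
        · exact Or.inl h
        · exact Or.inr (List.mem_cons_of_mem _ h)
      · rintro (h | h)
        · exact Or.inl h
        · rcases List.mem_cons.1 h with rfl | h
          · exact Or.inl hy
          · exact Or.inr h
    · rw [if_neg (fun hh => hy ((pv_any_beq seen y).mp hh)), ih]
      simp only [List.mem_append, List.mem_cons]
      tauto

lemma pvDstnct_mem (p : List Int) (x : Int) : x ∈ pvDstnct p ↔ x ∈ p := by
  have := pvDstnct_mem_aux p [] x
  simpa [pvDstnct] using this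

lemma pvDstnct_append (p : List Int) (x : Int) :
    pvDstnct (p ++ [x]) = if (pvDstnct p).any (fun d => d == x) then pvDstnct p else pvDstnct p ++ [x] := by
  simp [pvDstnct, List.foldl_append]

lemma pvCnt_append (p : List Int) (x lab : Int) :
    pvCnt (p ++ [x]) lab = pvCnt p lab + (if x == lab then 1 else 0) := by
  simp only [pvCnt, List.foldl_append, List.foldl_cons, List.foldl_nil]
  split <;> simp

lemma pvCnt_of_not_mem (p : List Int) (lab : Int) (h : lab ∉ p) : pvCnt p lab = 0 := by
  induction p using List.reverseRecOn with
  | nil => rfl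
  | append_singleton p x ih =>
    simp only [List.mem_append, List.mem_singleton, not_or] at h
    rw [pvCnt_append, ih h.1, if_neg (by simp only [beq_iff_eq]; exact fun hh => h.2 hh.symm)]
    omega

-- the inner 'for sublist' loop of A is a map plus an any
lemma innerA_eq (x : Int) (ds : List (List Int)) (init : List (List Int)) (b : Bool) :
    ds.foldl
      (fun (st : List (List Int) × Bool) sub =>
        if sub.getD 0 0 == x then (st.1 ++ [[sub.getD 0 0, sub.getD 1 0 + 1]], true)
        else (st.1 ++ [sub], st.2))
      (init, b)
    = (init ++ ds.map (fun sub => if sub.getD 0 0 == x then [sub.getD 0 0, sub.getD 1 0 + 1] else sub),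
       b || ds.any (fun sub => sub.getD 0 0 == x)) := by
  induction ds generalizing init b with
  | nil => simp
  | cons s ds ih =>
    simp only [List.foldl_cons, List.map_cons, List.any_cons]
    by_cases h : (s.getD 0 0 == x) = true
    · rw [if_pos h, ih, if_pos h, h]
      simp [List.append_assoc]
    · rw [if_neg h, ih, if_neg h]
      rw [Bool.eq_false_iff.mpr h]
      simp [List.append_assoc]

lemma pvTab_heads (p : List Int) (x : Int) :
    ((pvTab p).any (fun sub => sub.getD 0 0 == x)) = true ↔ x ∈ pvDstnct p := by
  simp only [pvTab, List.any_map, List.any_eq_true, Function.comp, List.getD,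
    List.getElem?_cons_zero, Option.getD_some, beq_iff_eq]
  constructor
  · rintro ⟨lab, hl, rfl⟩; exact hl
  · intro h; exact ⟨x, h, rfl⟩

lemma step_tab (p : List Int) (x : Int) : pvStepA (pvTab p) x = pvTab (p ++ [x]) := by
  unfold pvStepA
  rw [innerA_eq]
  simp only [Bool.false_or, List.nil_append]
  by_cases hf : ((pvTab p).any (fun sub => sub.getD 0 0 == x)) = true
  · have hx : x ∈ pvDstnct p := (pvTab_heads p x).mp hf
    have hd : pvDstnct (p ++ [x]) = pvDstnct p := by
      rw [pvDstnct_append, if_pos ((pv_any_beq _ x).mpr hx)]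
    rw [if_pos hf]
    simp only [pvTab, List.map_map, hd]
    apply List.map_congr_left
    intro lab _
    by_cases h : lab = x
    · subst h; simp [Function.comp, List.getD, pvCnt_append]
    · have hxl : ¬ x = lab := fun hh => h hh.symm
      simp [Function.comp, List.getD, h, hxl, pvCnt_append]
  · have hx : x ∉ pvDstnct p := fun h => hf ((pvTab_heads p x).mpr h)
    have hd : pvDstnct (p ++ [x]) = pvDstnct p ++ [x] := by
      rw [pvDstnct_append, if_neg (fun hh => hx ((pv_any_beq _ x).mp hh))]
    rw [if_neg hf]
    have hc0 : pvCnt p x = 0 :=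
      pvCnt_of_not_mem p x (fun h => hx ((pvDstnct_mem p x).mpr h))
    simp only [pvTab, List.map_map, hd, List.map_append, List.map_cons, List.map_nil]
    congr 1
    · apply List.map_congr_left
      intro lab hlab
      have hne : lab ≠ x := fun h => hx (h ▸ hlab)
      have hxl : ¬ x = lab := fun hh => hne hh.symm
      simp [Function.comp, List.getD, hne, hxl, pvCnt_append]
    · simp [pvCnt_append, hc0]

lemma a_eq_tab (p : List Int) : create_label_distribution_table p = pvTab p := by
  induction p using List.reverseRecOn with
  | nil => rfl
  | append_singleton p x ih =>
    unfold create_label_distribution_table at ih ⊢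
    rw [List.foldl_append, List.foldl_cons, List.foldl_nil, ih, step_tab]

lemma pvDstnct_eq_ofList (p : List Int) : pvDstnct p = PySem.Set.ofList p := by
  have hf : (fun (seen : List Int) (label : Int) =>
      if seen.any (fun d => d == label) then seen else seen ++ [label]) = PySem.Set.add := by
    funext s x
    simp [PySem.Set.add, PySem.Set.contains]
  rw [pvDstnct, hf]
  rfl

-- B's phase-1 pair fold: seen and distinct stay equal, both tracking Set.add
lemma pairFold_eq (p : List Int) (s : PySem.Set Int) :
    p.foldl
      (fun (st : PySem.Set Int × List Int) label =>
        if PySem.Set.contains st.1 label then st else (PySem.Set.add st.1 label, st.2 ++ [label]))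
      (s, s)
    = (p.foldl PySem.Set.add s, p.foldl PySem.Set.add s) := by
  induction p generalizing s with
  | nil => rfl
  | cons x p ih =>
    simp only [List.foldl_cons]
    by_cases h : PySem.Set.contains s x = true
    · rw [if_pos h]
      have hx : x ∈ s := by simpa [PySem.Set.contains] using h
      have : PySem.Set.add s x = s := by simp [PySem.Set.add, PySem.Set.contains, hx]
      rw [this, ih]
    · rw [if_neg h]
      have hx : x ∉ s := by simpa [PySem.Set.contains] using h
      have : PySem.Set.add s x = s ++ [x] := by simp [PySem.Set.add, PySem.Set.contains, hx]
      rw [this, ih]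

lemma alt_eq_tab (p : List Int) : create_label_distribution_table_alt p = pvTab p := by
  show (p.foldl
      (fun (st : PySem.Set Int × List Int) label =>
        if PySem.Set.contains st.1 label then st else (PySem.Set.add st.1 label, st.2 ++ [label]))
      (PySem.Set.empty, [])).2.map (fun lab => [lab, (PySem.List.count p lab : Int)]) = pvTab p
  rw [show ((PySem.Set.empty : PySem.Set Int), ([] : List Int))
        = (([] : List Int), ([] : List Int)) from rfl]
  rw [pairFold_eq]
  rw [pvTab, pvDstnct_eq_ofList, PySem.Set.ofList_eq_foldl]
  apply List.map_congr_left
  intro lab _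
  have hc : pvCnt p lab = (PySem.List.count p lab : Int) := by
    rw [pvCnt, PySem.List.foldl_beq_add_one, PySem.List.count_eq]
    omega
  rw [hc]

-- ===== VERDICT (by name: the statement is the Claim_ definition above) =====
theorem create_label_distribution_table_spec : Claim_equal_create_label_distribution_table := by
  intro p _
  unfold Spec_create_label_distribution_table
  rw [a_eq_tab, alt_eq_tab]
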